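-- pv_equiv track=rewrite | github.com/williamh1517/march_project | game.py | left_align
-- ===== SOURCE A (Python) =====
-- grid_size = 4
--
-- def left_align(grid):
--     new_grid = [[0]*grid_size for i in range(grid_size)]
--     for r in range(grid_size):
--         pos = 0
--         for c in range(grid_size):
--             if grid[r][c] != 0:
--                 new_grid[r][pos] = grid[r][c]
--                 pos += 1
--     return new_grid
-- ===== SOURCE B (Python) =====
-- grid_size = 4
--
-- def left_align(grid):
--     def shift(cells):
--         # recursively push each zero behind the shifted rest of the row
--         if not cells:
--             return []
--         if cells[0] == 0:
--             return shift(cells[1:]) + [0]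
--         return [cells[0]] + shift(cells[1:])
--     return [shift(grid[r][:grid_size]) for r in range(grid_size)]
-- ===== Notes on version B (the rewrite author's own statement) =====
-- stated objective: alternative
-- what changed: Replaces the preallocated zero grid with a moving write-pointer and scattered positional writes by a recursive row transform: each row's first 4 cells are shifted by structural recursion that moves a leading zero behind the shifted remainder (shift(rest)+[0]) and keeps a nonzero head in front, so no output grid, no index arithmetic and no pos counter exist.
import Mathlib
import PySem

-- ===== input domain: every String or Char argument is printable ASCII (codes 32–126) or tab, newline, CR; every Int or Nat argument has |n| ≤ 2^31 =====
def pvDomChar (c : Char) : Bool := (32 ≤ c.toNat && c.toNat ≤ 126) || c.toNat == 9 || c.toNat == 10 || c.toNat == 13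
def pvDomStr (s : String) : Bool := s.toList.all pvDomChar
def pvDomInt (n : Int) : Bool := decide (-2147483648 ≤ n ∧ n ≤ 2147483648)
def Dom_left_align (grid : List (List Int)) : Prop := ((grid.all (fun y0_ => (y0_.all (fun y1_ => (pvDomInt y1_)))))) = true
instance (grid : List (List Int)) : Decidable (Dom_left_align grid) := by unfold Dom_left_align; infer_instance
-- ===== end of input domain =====

-- B replaces A's preallocated zero grid + moving write-pointer by a recursive
-- row transform: a leading zero is moved behind the shifted remainder
-- (shift(rest)+[0]), a nonzero head stays in front (objective: alternative).

-- ===== PORT A =====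
-- literal port of A: preallocate a 4x4 zero grid, then for each row scan the
-- columns, writing each nonzero value at the moving position `pos`.
-- indexing uses pyGetD (in range under Pre_left_align, where Python returns).
def left_align (grid : List (List Int)) : List (List Int) :=
  let new_grid := (PySem.List.pyRange 0 4 1).map (fun _ => (PySem.List.pyRange 0 4 1).map (fun _ => (0 : Int)))
  (PySem.List.pyRange 0 4 1).foldl (fun ng r =>
    ((PySem.List.pyRange 0 4 1).foldl (fun (st : List (List Int) × Int) c =>
        if PySem.List.pyGetD (PySem.List.pyGetD grid r []) c 0 ≠ 0 then
          (PySem.List.pySetD st.1 r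
             (PySem.List.pySetD (PySem.List.pyGetD st.1 r []) st.2
               (PySem.List.pyGetD (PySem.List.pyGetD grid r []) c 0)),
           st.2 + 1)
        else st) (ng, (0 : Int))).1) new_grid

-- ===== PORT B =====
-- literal port of Source B's helper `shift`: structural recursion on the row
-- (cells[0] / cells[1:] = head / tail of the list)
def shiftRow : List Int → List Int
  | [] => []
  | x :: xs => if x = 0 then shiftRow xs ++ [0] else x :: shiftRow xs

-- literal port of Source B: shift each of the rows grid[r][:4] for r in range(4)
def left_align_alt (grid : List (List Int)) : List (List Int) :=
  (PySem.List.pyRange 0 4 1).map (fun r =>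
    shiftRow (PySem.List.slice (PySem.List.pyGetD grid r []) none (some 4)))

-- ===== PRECONDITION & SPEC =====
-- Pre_ excludes exactly the inputs where Python A raises IndexError:
-- fewer than 4 rows, or one of the first 4 rows with fewer than 4 entries.
def Pre_left_align (grid : List (List Int)) : Prop :=
  4 ≤ grid.length ∧ ∀ row ∈ grid.take 4, 4 ≤ row.length
instance (grid : List (List Int)) : Decidable (Pre_left_align grid) := by
  unfold Pre_left_align; infer_instance

def pvWitness_left_align : List (List Int) :=
  [[0, 2, 0, 2], [1, 0, 0, 3], [0, 0, 0, 0], [5, 6, 7, 8]]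

def Spec_left_align (grid : List (List Int)) (out : List (List Int)) : Prop := out = left_align_alt grid
instance (grid : List (List Int)) (out : List (List Int)) : Decidable (Spec_left_align grid out) := by unfold Spec_left_align; infer_instance

-- ===== CLAIM (what is proved, stated in full; the proofs are below) =====
def Claim_equal_left_align : Prop := ∀ (grid : List (List Int)), Dom_left_align grid → Pre_left_align grid → Spec_left_align grid (left_align grid)

-- ===== LEMMAS AND PROOFS =====

-- one step of A's inner loop, restricted to the single row it writes into
def rowStep (src : List Int) (st : List Int × Int) (c : Int) : List Int × Int :=
  if PySem.List.pyGetD src c 0 ≠ 0 then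
    (PySem.List.pySetD st.1 st.2 (PySem.List.pyGetD src c 0), st.2 + 1)
  else st

-- A's inner loop only rewrites row r of the grid state: it equals setting
-- row r to the result of the same fold run on that row alone.
theorem inner_loc (grid : List (List Int)) (r : Int) (hr : 0 ≤ r) :
    ∀ (cs : List Int) (ng : List (List Int)) (p : Int), r.toNat < ng.length →
    cs.foldl (fun (st : List (List Int) × Int) c =>
        if PySem.List.pyGetD (PySem.List.pyGetD grid r []) c 0 ≠ 0 then
          (PySem.List.pySetD st.1 r
             (PySem.List.pySetD (PySem.List.pyGetD st.1 r []) st.2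
               (PySem.List.pyGetD (PySem.List.pyGetD grid r []) c 0)),
           st.2 + 1)
        else st) (ng, p)
    = (PySem.List.pySetD ng r
         ((cs.foldl (rowStep (PySem.List.pyGetD grid r [])) (PySem.List.pyGetD ng r [], p)).1),
       (cs.foldl (rowStep (PySem.List.pyGetD grid r [])) (PySem.List.pyGetD ng r [], p)).2) := by
  intro cs
  induction cs with
  | nil =>
      intro ng p hlen
      have hlt : r < (ng.length : Int) := by omega
      simp [PySem.List.pySetD_of_nonneg _ _ hr, PySem.List.pyGetD_eq_getElem _ _ hr hlt,
            List.set_getElem_self]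
  | cons c cs ih =>
      intro ng p hlen
      by_cases hc : PySem.List.pyGetD (PySem.List.pyGetD grid r []) c 0 ≠ 0
      · have hlen' : r.toNat < (PySem.List.pySetD ng r
            (PySem.List.pySetD (PySem.List.pyGetD ng r []) p
              (PySem.List.pyGetD (PySem.List.pyGetD grid r []) c 0))).length := by
          simpa [PySem.List.pySetD_of_nonneg _ _ hr] using hlen
        have hlt : r < (ng.length : Int) := by omega
        have hget : PySem.List.pyGetD (PySem.List.pySetD ng r
            (PySem.List.pySetD (PySem.List.pyGetD ng r []) p
              (PySem.List.pyGetD (PySem.List.pyGetD grid r []) c 0))) r []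
            = PySem.List.pySetD (PySem.List.pyGetD ng r []) p
              (PySem.List.pyGetD (PySem.List.pyGetD grid r []) c 0) := by
          have hlt2 : r < ((PySem.List.pySetD ng r
            (PySem.List.pySetD (PySem.List.pyGetD ng r []) p
              (PySem.List.pyGetD (PySem.List.pyGetD grid r []) c 0))).length : Int) := by
            simp [PySem.List.pySetD_of_nonneg _ _ hr]; omega
          rw [PySem.List.pyGetD_eq_getElem _ _ hr hlt2]
          simp [PySem.List.pySetD_of_nonneg _ _ hr, List.getElem_set_self]
        simp only [List.foldl_cons, if_pos hc]
        rw [ih _ _ hlen', hget]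
        simp only [PySem.List.pySetD_of_nonneg _ _ hr, List.set_set, rowStep, if_pos hc]
      · simp only [List.foldl_cons, if_neg hc]
        rw [ih _ _ hlen]
        simp only [rowStep, if_neg hc]

-- A's inner fold for a single row, over the literal column list [0,1,2,3]
def rowA (grid : List (List Int)) (r : Int) : List Int :=
  (([0, 1, 2, 3] : List Int).foldl (rowStep (PySem.List.pyGetD grid r []))
     (([0, 0, 0, 0] : List Int), (0 : Int))).1

-- A's fold of rowStep over the 4 columns, started on a zero row, equals B's
-- recursive shift of the row's first 4 cells (16-way case split on zeros).
theorem row_eq (src : List Int) (h : 4 ≤ src.length) :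
    ((([0, 1, 2, 3] : List Int)).foldl (rowStep src) (([0, 0, 0, 0] : List Int), (0 : Int))).1
    = shiftRow (PySem.List.slice src none (some 4)) := by
  match src, h with
  | a :: b :: c :: d :: rest, _ =>
    have hs : PySem.List.slice (a :: b :: c :: d :: rest) none (some 4) = [a, b, c, d] := by
      simp [pysem]
    have g0 : PySem.List.pyGetD (a :: b :: c :: d :: rest) (0 : Int) 0 = a := by simp [pysem]
    have g1 : PySem.List.pyGetD (a :: b :: c :: d :: rest) (1 : Int) 0 = b := by simp [pysem]
    have g2 : PySem.List.pyGetD (a :: b :: c :: d :: rest) (2 : Int) 0 = c := by simp [pysem]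
    have g3 : PySem.List.pyGetD (a :: b :: c :: d :: rest) (3 : Int) 0 = d := by simp [pysem]
    rw [hs]
    simp only [List.foldl_cons, List.foldl_nil, rowStep, g0, g1, g2, g3]
    by_cases h0 : a = 0 <;> by_cases h1 : b = 0 <;> by_cases h2 : c = 0 <;> by_cases h3 : d = 0 <;>
    simp [h0, h1, h2, h3, shiftRow,
          PySem.List.pySetD, PySem.List.pySet?, PySem.List.pyIdx?]

-- unrolls a fold over the four row indices (stated at the outer state type
-- only, so it cannot touch the inner column fold)
theorem foldl4g (g : List (List Int) → Int → List (List Int)) (b : List (List Int)) :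
    List.foldl g b ([0, 1, 2, 3] : List Int) = g (g (g (g b 0) 1) 2) 3 := rfl

-- ===== VERDICT (by name: the statement is the Claim_ definition above) =====
theorem left_align_spec : Claim_equal_left_align := by
  intro grid _ hpre
  show left_align grid = left_align_alt grid
  obtain ⟨hlen, hrows⟩ := hpre
  have hrow : ∀ (i : Nat), i < 4 → 4 ≤ (PySem.List.pyGetD grid (i : Int) []).length := by
    intro i hi
    have hlt : (i : Int) < (grid.length : Int) := by exact_mod_cast (by omega : i < grid.length)
    rw [PySem.List.pyGetD_eq_getElem _ _ (by positivity) hlt]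
    have hi' : i < (grid.take 4).length := by simp; omega
    have : grid[(i : Int).toNat] ∈ grid.take 4 := by
      have := List.getElem_mem hi'
      simpa [List.getElem_take] using this
    exact hrows _ this
  have h0 := hrow 0 (by norm_num)
  have h1 := hrow 1 (by norm_num)
  have h2 := hrow 2 (by norm_num)
  have h3 := hrow 3 (by norm_num)
  simp only [Nat.cast_ofNat, Nat.cast_one, Nat.cast_zero] at h0 h1 h2 h3
  have e : PySem.List.pyRange 0 4 1 = [0, 1, 2, 3] := by decide
  have s0 : (([0, 1, 2, 3] : List Int).foldl (fun (st : List (List Int) × Int) c =>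
        if PySem.List.pyGetD (PySem.List.pyGetD grid 0 []) c 0 ≠ 0 then
          (PySem.List.pySetD st.1 0
             (PySem.List.pySetD (PySem.List.pyGetD st.1 0 []) st.2
               (PySem.List.pyGetD (PySem.List.pyGetD grid 0 []) c 0)), st.2 + 1)
        else st) (([[0,0,0,0],[0,0,0,0],[0,0,0,0],[0,0,0,0]] : List (List Int)), (0 : Int))).1
      = [rowA grid 0, [0,0,0,0], [0,0,0,0], [0,0,0,0]] := by
    rw [inner_loc grid 0 (by norm_num) [0,1,2,3] ([[0,0,0,0],[0,0,0,0],[0,0,0,0],[0,0,0,0]]) 0 (by norm_num)]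
    simp [rowA, PySem.List.pySetD, PySem.List.pySet?, PySem.List.pyIdx?,
          PySem.List.pyGetD, PySem.List.pyGet?]
  have s1 : (([0, 1, 2, 3] : List Int).foldl (fun (st : List (List Int) × Int) c =>
        if PySem.List.pyGetD (PySem.List.pyGetD grid 1 []) c 0 ≠ 0 then
          (PySem.List.pySetD st.1 1
             (PySem.List.pySetD (PySem.List.pyGetD st.1 1 []) st.2
               (PySem.List.pyGetD (PySem.List.pyGetD grid 1 []) c 0)), st.2 + 1)
        else st) (([rowA grid 0, [0,0,0,0], [0,0,0,0], [0,0,0,0]] : List (List Int)), (0 : Int))).1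
      = [rowA grid 0, rowA grid 1, [0,0,0,0], [0,0,0,0]] := by
    rw [inner_loc grid 1 (by norm_num) [0,1,2,3] ([rowA grid 0, [0,0,0,0], [0,0,0,0], [0,0,0,0]]) 0 (by norm_num)]
    simp [rowA, PySem.List.pySetD, PySem.List.pySet?, PySem.List.pyIdx?,
          PySem.List.pyGetD, PySem.List.pyGet?]
  have s2 : (([0, 1, 2, 3] : List Int).foldl (fun (st : List (List Int) × Int) c =>
        if PySem.List.pyGetD (PySem.List.pyGetD grid 2 []) c 0 ≠ 0 then
          (PySem.List.pySetD st.1 2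
             (PySem.List.pySetD (PySem.List.pyGetD st.1 2 []) st.2
               (PySem.List.pyGetD (PySem.List.pyGetD grid 2 []) c 0)), st.2 + 1)
        else st) (([rowA grid 0, rowA grid 1, [0,0,0,0], [0,0,0,0]] : List (List Int)), (0 : Int))).1
      = [rowA grid 0, rowA grid 1, rowA grid 2, [0,0,0,0]] := by
    rw [inner_loc grid 2 (by norm_num) [0,1,2,3] ([rowA grid 0, rowA grid 1, [0,0,0,0], [0,0,0,0]]) 0 (by norm_num)]
    simp [rowA, PySem.List.pySetD, PySem.List.pySet?, PySem.List.pyIdx?,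
          PySem.List.pyGetD, PySem.List.pyGet?]
  have s3 : (([0, 1, 2, 3] : List Int).foldl (fun (st : List (List Int) × Int) c =>
        if PySem.List.pyGetD (PySem.List.pyGetD grid 3 []) c 0 ≠ 0 then
          (PySem.List.pySetD st.1 3
             (PySem.List.pySetD (PySem.List.pyGetD st.1 3 []) st.2
               (PySem.List.pyGetD (PySem.List.pyGetD grid 3 []) c 0)), st.2 + 1)
        else st) (([rowA grid 0, rowA grid 1, rowA grid 2, [0,0,0,0]] : List (List Int)), (0 : Int))).1
      = [rowA grid 0, rowA grid 1, rowA grid 2, rowA grid 3] := by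
    rw [inner_loc grid 3 (by norm_num) [0,1,2,3] ([rowA grid 0, rowA grid 1, rowA grid 2, [0,0,0,0]]) 0 (by norm_num)]
    simp [rowA, PySem.List.pySetD, PySem.List.pySet?, PySem.List.pyIdx?,
          PySem.List.pyGetD, PySem.List.pyGet?]
  unfold left_align left_align_alt
  simp only [e, List.map_cons, List.map_nil]
  rw [foldl4g]
  rw [s0, s1, s2, s3]
  simp only [rowA]
  rw [row_eq _ h0, row_eq _ h1, row_eq _ h2, row_eq _ h3]
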